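-- pv_equiv track=rewrite | github.com/BIM-Woo/boj_study | boj study/숫자 맞추기.py | number_correct
-- ===== SOURCE A (Python) =====
-- def number_correct(game):   # number_correct 함수 정의
--     low, high = 1, 10  # 숫자의 최소, 최대 범위 설정
--
--     for num, response in game:  # num과 response를 game에서 하나씩 가져옴
--         if response == 'too high':
--             high = min(high, num - 1)  # high를 num-1과 high 중 작은 값으로 설정
--         elif response == 'too low':
--             low = max(low, num + 1)  # low를 num+1과 low 중 큰 값으로 설정
--         elif response == 'right on':
--             if not (low <= num <= high):  # 숫자가 올바른 범위에 있는지 확인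
--                 return 'Stan is dishonest'
--             return 'Stan may be honest'
--
--     return 'Stan is dishonest'  # 기본적으로 "Stan is dishonest" 반환
-- ===== SOURCE B (Python) =====
-- def number_correct(game):
--     idx = next((i for i, (n, r) in enumerate(game) if r == 'right on'), None)
--     if idx is None:
--         return 'Stan is dishonest'
--     num = game[idx][0]
--     prefix = game[:idx]
--     high = min([10] + [n - 1 for n, r in prefix if r == 'too high'])
--     low = max([1] + [n + 1 for n, r in prefix if r == 'too low'])
--     return 'Stan may be honest' if low <= num <= high else 'Stan is dishonest'
-- ===== Notes on version B (the rewrite author's own statement) =====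
-- stated objective: alternative
-- what changed: Replaces the sequential interval-narrowing loop by an index-find of the first 'right on' answer plus two filtered min/max reductions over the prefix before it.
import Mathlib
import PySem

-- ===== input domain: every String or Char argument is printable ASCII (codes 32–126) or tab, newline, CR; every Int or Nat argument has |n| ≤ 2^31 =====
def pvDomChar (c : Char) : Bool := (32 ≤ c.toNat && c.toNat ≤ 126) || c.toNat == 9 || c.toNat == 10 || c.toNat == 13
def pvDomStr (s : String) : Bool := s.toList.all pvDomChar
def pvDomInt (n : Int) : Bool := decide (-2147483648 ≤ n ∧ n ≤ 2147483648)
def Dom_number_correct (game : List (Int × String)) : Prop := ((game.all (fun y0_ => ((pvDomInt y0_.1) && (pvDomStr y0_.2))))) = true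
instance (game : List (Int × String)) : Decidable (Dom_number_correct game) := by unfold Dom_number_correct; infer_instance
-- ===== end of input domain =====

-- B is an alternative decomposition (find first 'right on', then two filtered reductions); return values proved equal on all inputs.

-- ===== PORT A =====
-- the for-loop of A as structural recursion over (low, high)
def numberCorrectLoop : List (Int × String) → Int → Int → String
  | [], _, _ => "Stan is dishonest"
  | (num, response) :: rest, low, high =>
    if response == "too high" then
      numberCorrectLoop rest low (min high (num - 1))
    else if response == "too low" then
      numberCorrectLoop rest (max low (num + 1)) high
    else if response == "right on" then
      if ¬ (low ≤ num ∧ num ≤ high) then "Stan is dishonest"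
      else "Stan may be honest"
    else
      numberCorrectLoop rest low high

def number_correct (game : List (Int × String)) : String :=
  numberCorrectLoop game 1 10

-- ===== PORT B =====
def highsOf (pre : List (Int × String)) : List Int :=
  pre.filterMap (fun p => if p.2 == "too high" then some (p.1 - 1) else none)

def lowsOf (pre : List (Int × String)) : List Int :=
  pre.filterMap (fun p => if p.2 == "too low" then some (p.1 + 1) else none)

def number_correct_alt (game : List (Int × String)) : String :=
  match List.findIdx? (fun p => p.2 == "right on") game with
  | none => "Stan is dishonest"
  | some i =>
    match PySem.List.pyGet? game (Int.ofNat i) with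
    | none => "Stan is dishonest"   -- unreachable: findIdx? returns an in-range index
    | some pr =>
      let num := pr.1
      let pre := game.take i
      let high := (highsOf pre).foldl min 10
      let low := (lowsOf pre).foldl max 1
      if low ≤ num ∧ num ≤ high then "Stan may be honest" else "Stan is dishonest"

-- ===== PRECONDITION & SPEC =====
def Spec_number_correct (game : List (Int × String)) (out : String) : Prop := out = number_correct_alt game
instance (game : List (Int × String)) (out : String) : Decidable (Spec_number_correct game out) := by unfold Spec_number_correct; infer_instance

-- ===== CLAIM (what is proved, stated in full; the proofs are below) =====
def Claim_equal_number_correct : Prop := ∀ (game : List (Int × String)), Dom_number_correct game → Spec_number_correct game (number_correct game)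

-- ===== LEMMAS AND PROOFS =====

-- B's computation with arbitrary seed bounds (proof-only generalisation of number_correct_alt's body)
def bodyB (game : List (Int × String)) (low high : Int) : String :=
  match List.findIdx? (fun p => p.2 == "right on") game with
  | none => "Stan is dishonest"
  | some i =>
    match PySem.List.pyGet? game (Int.ofNat i) with
    | none => "Stan is dishonest"
    | some pr =>
      if (lowsOf (game.take i)).foldl max low ≤ pr.1 ∧
         pr.1 ≤ (highsOf (game.take i)).foldl min high then "Stan may be honest"
      else "Stan is dishonest"

theorem pyGet_cons_succ (a : Int × String) (tl : List (Int × String)) (j : Nat)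
    (hj : j < tl.length) :
    PySem.List.pyGet? (a :: tl) (Int.ofNat (j + 1)) = PySem.List.pyGet? tl (Int.ofNat j) := by
  simp [PySem.List.pyGet?, PySem.List.pyIdx?, hj]
  rw [if_pos (by positivity)]
  simp [hj]

-- a non-'right on' head only updates the seeds
theorem bodyB_cons_skip (num : Int) (response : String) (tl : List (Int × String))
    (low high : Int) (hro : (response == "right on") = false) :
    bodyB ((num, response) :: tl) low high =
      bodyB tl (if response == "too low" then max low (num + 1) else low)
               (if response == "too high" then min high (num - 1) else high) := by
  unfold bodyB
  rw [List.findIdx?_cons]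
  simp only [hro, Bool.false_eq_true, if_false]
  cases h : List.findIdx? (fun p => p.2 == "right on") tl with
  | none => rfl
  | some j =>
    have hj : j < tl.length := by
      have := List.findIdx?_eq_some_iff_findIdx_eq.mp h
      omega
    simp only [Option.map_some]
    rw [pyGet_cons_succ _ _ _ hj]
    cases PySem.List.pyGet? tl (Int.ofNat j) with
    | none => rfl
    | some pr =>
      simp only [List.take_succ_cons, lowsOf, highsOf, List.filterMap_cons]
      by_cases h1 : response = "too high" <;> by_cases h2 : response = "too low" <;>
        simp_all [List.foldl_cons]

theorem loop_eq_bodyB (game : List (Int × String)) : ∀ (low high : Int),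
    numberCorrectLoop game low high = bodyB game low high := by
  induction game with
  | nil => intro low high; simp [numberCorrectLoop, bodyB]
  | cons hd tl ih =>
    intro low high
    obtain ⟨num, response⟩ := hd
    by_cases hro : response = "right on"
    · subst hro
      simp [numberCorrectLoop, bodyB, List.findIdx?_cons, PySem.List.pyGet?, PySem.List.pyIdx?,
        lowsOf, highsOf]
      split_ifs with h1 h2 <;> first | rfl | omega
    · have hro' : (response == "right on") = false := by simp [hro]
      rw [bodyB_cons_skip _ _ _ _ _ hro']
      by_cases h1 : response = "too high" <;> by_cases h2 : response = "too low" <;>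
        simp_all [numberCorrectLoop]

-- ===== VERDICT (by name: the statement is the Claim_ definition above) =====
theorem number_correct_spec : Claim_equal_number_correct := by
  intro game _
  unfold Spec_number_correct number_correct number_correct_alt
  rw [loop_eq_bodyB]
  rfl
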